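-- pv_equiv track=rewrite | github.com/parkdohuni/codingtest | programmers/5.py | solution
-- ===== SOURCE A (Python) =====
-- def solution(picks, minerals):
--     answer = 0
--
--     sum = 0
--     for pick in picks:
--         sum += pick
--
--     num_minerals = sum * 5
--     if num_minerals < len(minerals):
--         minerals = minerals[:num_minerals]
--
--     cnt_min = [[0, 0, 0] for _ in range(10)]
--
--     for i in range(len(minerals)):
--         if minerals[i] == "diamond":
--             cnt_min[i // 5][0] += 1
--         elif minerals[i] == "iron":
--             cnt_min[i // 5][1] += 1
--         else:
--             cnt_min[i // 5][2] += 1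
--
--     sort_cnt_minerals = sorted(cnt_min, key=lambda x: (-x[0], -x[1], -x[2]))
--
--     for idx in sort_cnt_minerals:
--         d, i, s = idx
--         for k in range(len(picks)):
--             if k == 0 and picks[k] > 0:
--                 picks[k] -= 1
--                 answer += d + i + s
--                 break
--             elif k == 1 and picks[k] > 0:
--                 picks[k] -= 1
--                 answer += d * 5 + i + s
--                 break
--             elif k == 2 and picks[k] > 0:
--                 picks[k] -= 1
--                 answer += d * 25 + i * 5 + s
--                 break
--
--     return answer
-- ===== SOURCE B (Python) =====
-- # B: streaming flush builds a histogram of (diamond, iron, stone) group profiles, then a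
-- # counting-sort style walk over the descending profile space pays a flat pick-weight list
-- # (no comparison sort, no fixed 10-slot table, no nested pick scan).  A mutates `picks`
-- # in place; B does not, so the equivalence is about the return value only.
-- def solution(picks, minerals):
--     cap = 5 * sum(picks)
--     usable = minerals if cap >= len(minerals) else minerals[:cap]
--     freq = {}
--     d = i = s = 0
--     for m in usable:
--         if m == "diamond":
--             d += 1
--         elif m == "iron":
--             i += 1
--         else:
--             s += 1
--         if d + i + s == 5:
--             freq[(d, i, s)] = freq.get((d, i, s), 0) + 1
--             d = i = s = 0
--     if d + i + s > 0:
--         freq[(d, i, s)] = freq.get((d, i, s), 0) + 1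
--     groups = (len(usable) + 4) // 5
--     weights = []
--     for w, p in zip(((1, 1, 1), (5, 1, 1), (25, 5, 1)), picks):
--         weights += [w] * min(p, groups - len(weights))
--     ans = 0
--     rest = weights
--     for d in range(5, -1, -1):
--         for i in range(5 - d, -1, -1):
--             for s in range(5 - d - i, -1, -1):
--                 c = freq.get((d, i, s), 0)
--                 paid, rest = rest[:c], rest[c:]
--                 for wd, wi, ws in paid:
--                     ans += wd * d + wi * i + ws * s
--     return ans
-- ===== Notes on version B (the rewrite author's own statement) =====
-- stated objective: alternative
-- what changed: A's index-table counting (cnt_min[i//5]), comparison sort and nested pick-scan with in-place decrements are replaced by a streaming flush that histograms (d,i,s) group profiles into a dict, a counting-sort style descending walk over the 56-point profile space, and a flat pick-weight list consumed by slicing; B does not mutate picks (return-value equivalence).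
import Mathlib
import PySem

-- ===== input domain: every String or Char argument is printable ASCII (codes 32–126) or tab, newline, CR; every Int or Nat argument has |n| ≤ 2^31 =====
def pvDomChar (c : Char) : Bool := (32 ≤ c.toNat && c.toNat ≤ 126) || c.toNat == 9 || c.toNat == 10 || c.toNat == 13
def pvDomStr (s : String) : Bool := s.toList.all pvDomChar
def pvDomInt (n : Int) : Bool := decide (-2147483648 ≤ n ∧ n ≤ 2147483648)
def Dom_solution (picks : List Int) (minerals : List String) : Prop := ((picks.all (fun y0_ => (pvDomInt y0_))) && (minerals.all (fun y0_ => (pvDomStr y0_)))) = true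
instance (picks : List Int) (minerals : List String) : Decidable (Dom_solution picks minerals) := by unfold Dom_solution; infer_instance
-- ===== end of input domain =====

-- B replaces A's comparison sort and nested pick scan by a streaming histogram of group
-- profiles walked in counting-sort order against a flat pick-weight list; A mutates `picks`
-- in place while B leaves it unmodified, so the equivalence proved here is about the return
-- value only.

-- ===== PORT A =====
-- the sort key (-x[0], -x[1], -x[2]) — Python tuples compare lexicographically
def pvKey (t : Int × Int × Int) : Lex (Int × Lex (Int × Int)) := toLex (-t.1, toLex (-t.2.1, -t.2.2))

-- one iteration of A's counting loop (body of `for i in range(len(minerals))`)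
def pvCntStep (m : List String) (cnt : List (Int × Int × Int)) (i : Int) : List (Int × Int × Int) :=
  if PySem.List.pyGetD m i "" = "diamond" then
    cnt.modify (PySem.Int.floordiv i 5).toNat (fun t => (t.1 + 1, t.2.1, t.2.2))
  else if PySem.List.pyGetD m i "" = "iron" then
    cnt.modify (PySem.Int.floordiv i 5).toNat (fun t => (t.1, t.2.1 + 1, t.2.2))
  else
    cnt.modify (PySem.Int.floordiv i 5).toNat (fun t => (t.1, t.2.1, t.2.2 + 1))

-- A's inner `for k in range(len(picks))` with its three guarded branches and `break`
def pvAssignGo (d i s : Int) (ans : Int) (picks : List Int) : List Int → Int × List Int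
  | [] => (ans, picks)
  | k :: ks =>
    if k = 0 ∧ PySem.List.pyGetD picks k 0 > 0 then
      (ans + (d + i + s), picks.modify 0 (· - 1))
    else if k = 1 ∧ PySem.List.pyGetD picks k 0 > 0 then
      (ans + (d * 5 + i + s), picks.modify 1 (· - 1))
    else if k = 2 ∧ PySem.List.pyGetD picks k 0 > 0 then
      (ans + (d * 25 + i * 5 + s), picks.modify 2 (· - 1))
    else pvAssignGo d i s ans picks ks

def solution (picks : List Int) (minerals : List String) : Int :=
  let sum := picks.foldl (fun acc pick => acc + pick) 0
  let numMinerals := sum * 5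
  let minerals' := if numMinerals < (minerals.length : Int) then
      PySem.List.slice minerals none (some numMinerals) else minerals
  let cntMin := (PySem.List.pyRange 0 (minerals'.length : Int) 1).foldl (pvCntStep minerals')
      (List.replicate 10 ((0:Int), (0:Int), (0:Int)))
  let sortCnt := PySem.List.sorted cntMin pvKey
  let res := sortCnt.foldl
      (fun st idx => pvAssignGo idx.1 idx.2.1 idx.2.2 st.1 st.2
        (PySem.List.pyRange 0 (st.2.length : Int) 1)) (0, picks)
  res.1

-- ===== PORT B =====
-- the descending (d, i, s) profile space: for d in range(5,-1,-1): for i in range(5-d,-1,-1): for s in range(5-d-i,-1,-1)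
def pvTriples : List (Int × Int × Int) :=
  (PySem.List.pyRange 5 (-1) (-1)).flatMap (fun d =>
    (PySem.List.pyRange (5 - d) (-1) (-1)).flatMap (fun i =>
      (PySem.List.pyRange (5 - d - i) (-1) (-1)).map (fun s => (d, i, s))))

-- body of B's streaming loop `for m in usable`: classify, then flush a completed group
def pvFlushStep (st : PySem.Dict (Int × Int × Int) Int × (Int × Int × Int)) (m : String) :
    PySem.Dict (Int × Int × Int) Int × (Int × Int × Int) :=
  let t := if m = "diamond" then (st.2.1 + 1, st.2.2.1, st.2.2.2)
           else if m = "iron" then (st.2.1, st.2.2.1 + 1, st.2.2.2)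
           else (st.2.1, st.2.2.1, st.2.2.2 + 1)
  if t.1 + t.2.1 + t.2.2 = 5 then (st.1.insert t (st.1.getD t 0 + 1), (0, 0, 0))
  else (st.1, t)

def solution_alt (picks : List Int) (minerals : List String) : Int :=
  let cap := 5 * picks.sum
  let usable := if cap ≥ (minerals.length : Int) then minerals
                else PySem.List.slice minerals none (some cap)
  let st := usable.foldl pvFlushStep (PySem.Dict.empty, (0, 0, 0))
  let freq := if st.2.1 + st.2.2.1 + st.2.2.2 > 0 then
      st.1.insert st.2 (st.1.getD st.2 0 + 1) else st.1
  let groups := PySem.Int.floordiv ((usable.length : Int) + 4) 5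
  let weights := (([((1:Int), (1:Int), (1:Int)), (5, 1, 1), (25, 5, 1)]).zip picks).foldl
      (fun acc wp => acc ++ List.replicate (min wp.2 (groups - (acc.length : Int))).toNat wp.1) []
  let res := pvTriples.foldl (fun (st : Int × List (Int × Int × Int)) t =>
      let c := (freq.getD t 0).toNat
      let paid := st.2.take c
      (paid.foldl (fun a w => a + w.1 * t.1 + w.2.1 * t.2.1 + w.2.2 * t.2.2) st.1,
       st.2.drop c)) (0, weights)
  res.1

-- ===== PRECONDITION & SPEC =====
-- Pre_ excludes exactly the inputs on which A raises IndexError: those where the (possibly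
-- truncated) mineral list is longer than 50, so an index i with i//5 ≥ 10 hits A's fixed
-- 10-entry cnt_min table.  pvEffLen is the length of the truncated list, written arithmetically.
def pvEffLen (picks : List Int) (minerals : List String) : Int :=
  let S := 5 * picks.sum
  let L : Int := minerals.length
  if S < L then (if 0 ≤ S then S else max 0 (L + S)) else L

def Pre_solution (picks : List Int) (minerals : List String) : Prop :=
  pvEffLen picks minerals ≤ 50
instance (picks : List Int) (minerals : List String) : Decidable (Pre_solution picks minerals) := by
  unfold Pre_solution; infer_instance

def pvWitness_solution : List Int × List String := ([1, 2], ["diamond", "stone", "iron"])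

def Spec_solution (picks : List Int) (minerals : List String) (out : Int) : Prop := out = solution_alt picks minerals
instance (picks : List Int) (minerals : List String) (out : Int) : Decidable (Spec_solution picks minerals out) := by unfold Spec_solution; infer_instance

-- ===== CLAIM (what is proved, stated in full; the proofs are below) =====
def Claim_equal_solution : Prop := ∀ (picks : List Int) (minerals : List String), Dom_solution picks minerals → Pre_solution picks minerals → Spec_solution picks minerals (solution picks minerals)

-- ===== LEMMAS AND PROOFS =====

-- ---- shared vocabulary of the proofs ----

-- the flat pick-order sequence [0]*picks[0] ++ [1]*picks[1] ++ [2]*picks[2] (uncapped)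
def pvOrdF : List Int → List Int
  | [] => []
  | [a] => List.replicate a.toNat 0
  | [a, b] => List.replicate a.toNat 0 ++ List.replicate b.toNat 1
  | a :: b :: c :: _ => List.replicate a.toNat 0 ++ List.replicate b.toNat 1 ++ List.replicate c.toNat 2

def pvCost (g : Int × Int × Int) (k : Int) : Int :=
  if k = 0 then g.1 + g.2.1 + g.2.2
  else if k = 1 then 5 * g.1 + g.2.1 + g.2.2
  else 25 * g.1 + 5 * g.2.1 + g.2.2

def pvZipSum (L : List (Int × Int × Int)) (o : List Int) : Int :=
  ((L.zip o).map (fun pr => pvCost pr.1 pr.2)).sum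

def pvCnt3 (chunk : List String) : Int × Int × Int :=
  let d : Int := PySem.List.count chunk "diamond"
  let r : Int := PySem.List.count chunk "iron"
  (d, r, (chunk.length : Int) - d - r)

lemma pvZipSum_nil_right (L : List (Int × Int × Int)) : pvZipSum L [] = 0 := by
  cases L <;> rfl
lemma pvZipSum_cons (g : Int × Int × Int) (L : List (Int × Int × Int)) (k : Int) (o : List Int) :
    pvZipSum (g :: L) (k :: o) = pvCost g k + pvZipSum L o := by
  simp [pvZipSum]

lemma pvCost_zero (k : Int) : pvCost (0, 0, 0) k = 0 := by
  unfold pvCost; split_ifs <;> ring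

lemma pvZipSum_zeros (n : Nat) (o : List Int) :
    pvZipSum (List.replicate n ((0:Int), (0:Int), (0:Int))) o = 0 := by
  induction n generalizing o with
  | zero => rfl
  | succ n ih =>
    cases o with
    | nil => exact pvZipSum_nil_right _
    | cons k o => rw [List.replicate_succ, pvZipSum_cons, pvCost_zero, ih]; ring

lemma pvZipSum_append_zeros (xs : List (Int × Int × Int)) (n : Nat) (o : List Int) :
    pvZipSum (xs ++ List.replicate n ((0:Int), (0:Int), (0:Int))) o = pvZipSum xs o := by
  induction xs generalizing o with
  | nil => rw [List.nil_append, pvZipSum_zeros]; rfl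
  | cons g xs ih =>
    cases o with
    | nil => rw [pvZipSum_nil_right, pvZipSum_nil_right]
    | cons k o => rw [List.cons_append, pvZipSum_cons, pvZipSum_cons, ih]

-- ---- counting (A's 10-bucket table as chunk counts) ----

lemma pvCnt3_nil : pvCnt3 [] = (0, 0, 0) := rfl

lemma count_pair_le_length (c : List String) (a b : String) (hab : a ≠ b) :
    PySem.List.count c a + PySem.List.count c b ≤ c.length := by
  induction c with
  | nil => simp [PySem.List.count]
  | cons x c ih =>
    simp only [PySem.List.count] at *
    rw [List.count_cons, List.count_cons, List.length_cons]
    have h1 : (if (x == a) then 1 else 0) + (if (x == b) then 1 else 0) ≤ 1 := by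
      by_cases hxa : x = a <;> by_cases hxb : x = b <;> simp_all
    omega

lemma pvCnt3_nonneg (c : List String) :
    0 ≤ (pvCnt3 c).1 ∧ 0 ≤ (pvCnt3 c).2.1 ∧ 0 ≤ (pvCnt3 c).2.2 := by
  have h := count_pair_le_length c "diamond" "iron" (by decide)
  refine ⟨by simp [pvCnt3], by simp [pvCnt3], ?_⟩
  simp only [pvCnt3]

  omega

lemma pvCnt3_sum (c : List String) :
    (pvCnt3 c).1 + (pvCnt3 c).2.1 + (pvCnt3 c).2.2 = (c.length : Int) := by
  simp only [pvCnt3]; ring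

lemma pvCnt3_append (c : List String) (x : String) :
    pvCnt3 (c ++ [x]) =
      (if x = "diamond" then (fun t : Int × Int × Int => (t.1 + 1, t.2.1, t.2.2))
       else if x = "iron" then (fun t : Int × Int × Int => (t.1, t.2.1 + 1, t.2.2))
       else (fun t : Int × Int × Int => (t.1, t.2.1, t.2.2 + 1))) (pvCnt3 c) := by
  by_cases h1 : x = "diamond"
  · subst h1
    simp [pvCnt3, PySem.List.count]
  · by_cases h2 : x = "iron"
    · subst h2
      simp [pvCnt3, PySem.List.count]
      ring
    · simp [pvCnt3, PySem.List.count, h1, h2]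
      ring

lemma chunk_append_ne (m : List String) (x : String) (j : Nat) (hj : j ≠ m.length / 5) :
    ((m ++ [x]).drop (5 * j)).take 5 = (m.drop (5 * j)).take 5 := by
  rcases Nat.lt_or_ge j (m.length / 5) with h | h
  · have h5 : 5 * j + 5 ≤ m.length := by omega
    rw [List.drop_append_of_le_length (by omega),
        List.take_append_of_le_length (by simp; omega)]
  · have h5 : m.length < 5 * j := by omega
    rw [List.drop_eq_nil_of_le (le_of_lt h5), List.drop_eq_nil_of_le (by simp; omega)]

lemma chunk_append_eq (m : List String) (x : String) :
    ((m ++ [x]).drop (5 * (m.length / 5))).take 5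
      = (m.drop (5 * (m.length / 5))).take 5 ++ [x] := by
  have h1 : 5 * (m.length / 5) ≤ m.length := by omega
  rw [List.drop_append_of_le_length h1]
  have h2 : (m.drop (5 * (m.length / 5))).length ≤ 4 := by simp; omega
  rw [List.take_of_length_le (by simp at h2 ⊢; omega),
      List.take_of_length_le (by omega)]

lemma modify_map_range {α : Type} (n j : Nat) (g : α → α) (f : Nat → α) (_hj : j < n) :
    ((List.range n).map f).modify j g
      = (List.range n).map (fun j' => if j' = j then g (f j') else f j') := by
  apply List.ext_getElem
  · simp
  · intro i h1 h2
    simp only [List.getElem_modify, List.getElem_map, List.getElem_range] at *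
    by_cases hij : j = i
    · subst hij; simp
    · rw [if_neg hij, if_neg (fun h => hij h.symm)]

lemma pvCntStep_congr (m : List String) (x : String) (cnt : List (Int × Int × Int)) (i : Int)
    (h0 : 0 ≤ i) (h1 : i < (m.length : Int)) :
    pvCntStep (m ++ [x]) cnt i = pvCntStep m cnt i := by
  have hg : PySem.List.pyGetD (m ++ [x]) i "" = PySem.List.pyGetD m i "" := by
    rw [PySem.List.pyGetD_eq_getElem _ _ h0 (by simp; omega),
        PySem.List.pyGetD_eq_getElem _ _ h0 h1]
    exact List.getElem_append_left (by omega)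
  simp only [pvCntStep, hg]

lemma cnt_fold_eq (m : List String) (hm : m.length ≤ 50) :
    (PySem.List.pyRange 0 (m.length : Int) 1).foldl (pvCntStep m)
        (List.replicate 10 ((0:Int), (0:Int), (0:Int)))
      = (List.range 10).map (fun j => pvCnt3 ((m.drop (5 * j)).take 5)) := by
  induction m using List.reverseRecOn with
  | nil =>
    rw [show ((([] : List String).length : Int) = 0) by simp, PySem.List.pyRange_zero]
    simp [pvCnt3_nil, List.map_const']
  | append_singleton m x ih =>
    have hm' : m.length ≤ 50 := by simp at hm; omega
    have hlen : (((m ++ [x]).length : Int)) = (m.length : Int) + 1 := by simp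
    rw [hlen, PySem.List.pyRange_one_succ_right (by positivity), List.foldl_append]
    rw [PySem.List.foldl_congr_mem (PySem.List.pyRange 0 (m.length : Int) 1) _ (pvCntStep m) _
      (by
        intro acc i hi
        rw [PySem.List.mem_pyRange_one] at hi
        exact pvCntStep_congr m x acc i hi.1 hi.2)]
    rw [ih hm']
    simp only [List.foldl_cons, List.foldl_nil]
    have hq : m.length / 5 < 10 := by omega
    have hgd : PySem.List.pyGetD (m ++ [x]) (m.length : Int) "" = x := by
      rw [PySem.List.pyGetD_eq_getElem _ _ (by positivity) (by simp)]
      rw [List.getElem_append_right (by simp)]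
      simp
    have hfd : (PySem.Int.floordiv (m.length : Int) 5).toNat = m.length / 5 := by
      simp only [PySem.Int.floordiv, Int.fdiv_eq_ediv]
      omega
    have key : ∀ g : Int × Int × Int → Int × Int × Int,
        ((List.range 10).map (fun j => pvCnt3 ((m.drop (5 * j)).take 5))).modify (m.length / 5) g
          = (List.range 10).map (fun j =>
              if j = m.length / 5 then g (pvCnt3 ((m.drop (5 * j)).take 5))
              else pvCnt3 ((m.drop (5 * j)).take 5)) := by
      intro g; exact modify_map_range 10 _ g _ hq
    have rhs : ∀ j, j < 10 →
        pvCnt3 (((m ++ [x]).drop (5 * j)).take 5)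
          = if j = m.length / 5
            then ((if x = "diamond" then (fun t : Int × Int × Int => (t.1 + 1, t.2.1, t.2.2))
                  else if x = "iron" then (fun t : Int × Int × Int => (t.1, t.2.1 + 1, t.2.2))
                  else (fun t : Int × Int × Int => (t.1, t.2.1, t.2.2 + 1))))
                    (pvCnt3 ((m.drop (5 * j)).take 5))
            else pvCnt3 ((m.drop (5 * j)).take 5) := by
      intro j hj
      by_cases hje : j = m.length / 5
      · subst hje; rw [if_pos rfl, chunk_append_eq, pvCnt3_append]
      · rw [if_neg hje, chunk_append_ne m x j hje]
    simp only [pvCntStep, hgd, hfd]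
    split_ifs with h1 h2
    · rw [key]; apply List.map_congr_left; intro j hj
      rw [List.mem_range] at hj
      rw [rhs j hj]
      split_ifs <;> simp_all
    · rw [key]; apply List.map_congr_left; intro j hj
      rw [List.mem_range] at hj
      rw [rhs j hj]
      split_ifs <;> simp_all
    · rw [key]; apply List.map_congr_left; intro j hj
      rw [List.mem_range] at hj
      rw [rhs j hj]
      split_ifs <;> simp_all

-- ---- sorting with trailing zero groups ----

lemma pvKey_inj : Function.Injective pvKey := by
  intro a b h
  have h' := congrArg ofLex h
  simp only [pvKey, ofLex_toLex] at h'
  have h1 : -a.1 = -b.1 := congrArg Prod.fst h'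
  have h2' := congrArg ofLex (congrArg Prod.snd h')
  simp only [ofLex_toLex] at h2'
  have h3 : -a.2.1 = -b.2.1 := congrArg Prod.fst h2'
  have h4 : -a.2.2 = -b.2.2 := congrArg Prod.snd h2'
  exact Prod.ext (by omega) (Prod.ext (by omega) (by omega))

lemma pvKey_le_zero (t : Int × Int × Int) (h1 : 0 ≤ t.1) (h2 : 0 ≤ t.2.1) (h3 : 0 ≤ t.2.2) :
    pvKey t ≤ pvKey (0, 0, 0) := by
  simp only [pvKey]
  rw [Prod.Lex.le_iff]
  simp only [ofLex_toLex]
  rcases lt_or_eq_of_le h1 with h | h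
  · left; omega
  · right
    refine ⟨by omega, ?_⟩
    rw [Prod.Lex.le_iff]
    simp only [ofLex_toLex]
    rcases lt_or_eq_of_le h2 with h' | h'
    · left; omega
    · right; constructor <;> omega

lemma sorted_append_zeros (g : List (Int × Int × Int)) (n : Nat)
    (hg : ∀ t ∈ g, pvKey t ≤ pvKey (0, 0, 0)) :
    PySem.List.sorted (g ++ List.replicate n ((0:Int), (0:Int), (0:Int))) pvKey
      = PySem.List.sorted g pvKey ++ List.replicate n ((0:Int), (0:Int), (0:Int)) := by
  apply PySem.List.eq_of_perm_of_pairwise_le_of_injective pvKey pvKey_inj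
  · exact (PySem.List.sorted_perm _ _ _).trans
      (((PySem.List.sorted_perm g pvKey false).symm).append_right _)
  · exact PySem.List.sorted_pairwise _ _
  · rw [List.pairwise_append]
    refine ⟨PySem.List.sorted_pairwise _ _, ?_, ?_⟩
    · rw [List.pairwise_replicate]; right; exact le_refl _
    · intro a ha b hb
      rw [List.eq_of_mem_replicate hb]
      exact hg a ((PySem.List.mem_sorted _ _ _ _).1 ha)

-- ---- A's greedy assignment vs the flat order ----

lemma assign_skip (d i s a : Int) (p : List Int) (ks : List Int) (h : ∀ k ∈ ks, 3 ≤ k) :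
    pvAssignGo d i s a p ks = (a, p) := by
  induction ks with
  | nil => rfl
  | cons k ks ih =>
    have hk := h k (List.mem_cons_self)
    rw [pvAssignGo, if_neg (by omega), if_neg (by omega), if_neg (by omega)]
    exact ih (fun k hk' => h k (List.mem_cons_of_mem _ hk'))

lemma assign_char (p : List Int) (a d i s : Int) :
    (pvOrdF p = [] ∧ pvAssignGo d i s a p (PySem.List.pyRange 0 (p.length : Int) 1) = (a, p)) ∨
    (∃ k t q, pvOrdF p = k :: t ∧
      pvAssignGo d i s a p (PySem.List.pyRange 0 (p.length : Int) 1) = (a + pvCost (d, i, s) k, q) ∧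
      pvOrdF q = t) := by
  match p with
  | [] =>
    left
    constructor
    · rfl
    · rw [show (((([]:List Int)).length : Int) = 0) by simp, PySem.List.pyRange_zero]; rfl
  | [x] =>
    rw [show ((([x]:List Int).length : Int) = 0 + 1) by simp,
        PySem.List.pyRange_one_singleton]
    by_cases hx : x > 0
    · right
      refine ⟨0, List.replicate (x - 1).toNat 0, [x - 1], ?_, ?_, ?_⟩
      · show List.replicate x.toNat 0 = _
        rw [show x.toNat = (x - 1).toNat + 1 by omega, List.replicate_succ]
      · rw [pvAssignGo, if_pos ⟨rfl, by rwa [PySem.List.pyGetD_of_nonneg _ _ (by norm_num)]⟩]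
        simp [List.modify, pvCost]; try ring
      · rfl
    · left
      constructor
      · show List.replicate x.toNat 0 = []
        rw [show x.toNat = 0 by omega]; rfl
      · rw [pvAssignGo,
          if_neg (by rw [PySem.List.pyGetD_of_nonneg _ _ (by norm_num)]; simp; omega),
          if_neg (by simp), if_neg (by simp)]
        rfl
  | [x, y] =>
    rw [show ((([x, y]:List Int).length : Int) = 2) by simp,
        PySem.List.pyRange_one_cons (by norm_num),
        show ((0:Int) + 1 = 1) by ring, PySem.List.pyRange_one_cons (by norm_num),
        show ((1:Int) + 1 = 2) by ring, PySem.List.pyRange_one_eq_nil (by norm_num)]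
    have hgx : PySem.List.pyGetD [x, y] 0 0 = x := by
      rw [PySem.List.pyGetD_of_nonneg _ _ (by norm_num)]; rfl
    have hgy : PySem.List.pyGetD [x, y] 1 0 = y := by
      rw [PySem.List.pyGetD_of_nonneg _ _ (by norm_num)]; rfl
    by_cases hx : x > 0
    · right
      refine ⟨0, List.replicate (x - 1).toNat 0 ++ List.replicate y.toNat 1, [x - 1, y], ?_, ?_, ?_⟩
      · show List.replicate x.toNat 0 ++ _ = _
        rw [show x.toNat = (x - 1).toNat + 1 by omega, List.replicate_succ]; rfl
      · rw [pvAssignGo, if_pos ⟨rfl, by rwa [hgx]⟩]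
        simp [List.modify, pvCost]; try ring
      · rfl
    · have hordx : List.replicate x.toNat (0:Int) = [] := by
        rw [show x.toNat = 0 by omega]; rfl
      by_cases hy : y > 0
      · right
        refine ⟨1, List.replicate (y - 1).toNat 1, [x, y - 1], ?_, ?_, ?_⟩
        · show List.replicate x.toNat 0 ++ List.replicate y.toNat 1 = _
          rw [hordx, show y.toNat = (y - 1).toNat + 1 by omega, List.replicate_succ]; rfl
        · rw [pvAssignGo, if_neg (by rw [hgx]; simp; omega), if_neg (by simp), if_neg (by simp),
              pvAssignGo, if_neg (by simp), if_pos ⟨rfl, by rwa [hgy]⟩]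
          simp [List.modify, pvCost]; try ring
        · show List.replicate x.toNat 0 ++ List.replicate (y-1).toNat 1 = _
          rw [hordx]; rfl
      · left
        constructor
        · show List.replicate x.toNat 0 ++ List.replicate y.toNat 1 = []
          rw [hordx, show y.toNat = 0 by omega]; rfl
        · rw [pvAssignGo, if_neg (by rw [hgx]; simp; omega), if_neg (by simp), if_neg (by simp),
              pvAssignGo, if_neg (by simp), if_neg (by rw [hgy]; simp; omega), if_neg (by simp)]
          rfl
  | x :: y :: z :: r =>
    have hlen : (((x :: y :: z :: r : List Int).length : Int)) = (r.length : Int) + 3 := by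
      simp; ring
    rw [hlen,
        PySem.List.pyRange_one_cons (by positivity),
        show ((0:Int) + 1 = 1) by ring, PySem.List.pyRange_one_cons (by omega),
        show ((1:Int) + 1 = 2) by ring, PySem.List.pyRange_one_cons (by omega),
        show ((2:Int) + 1 = 3) by ring]
    have hskip : ∀ k ∈ PySem.List.pyRange 3 ((r.length : Int) + 3) 1, (3:Int) ≤ k := by
      intro k hk; exact ((PySem.List.mem_pyRange_one).1 hk).1
    have hgx : PySem.List.pyGetD (x :: y :: z :: r) 0 0 = x := by
      rw [PySem.List.pyGetD_of_nonneg _ _ (by norm_num)]; rfl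
    have hgy : PySem.List.pyGetD (x :: y :: z :: r) 1 0 = y := by
      rw [PySem.List.pyGetD_of_nonneg _ _ (by norm_num)]; rfl
    have hgz : PySem.List.pyGetD (x :: y :: z :: r) 2 0 = z := by
      rw [PySem.List.pyGetD_of_nonneg _ _ (by norm_num)]; rfl
    by_cases hx : x > 0
    · right
      refine ⟨0, List.replicate (x - 1).toNat 0 ++ List.replicate y.toNat 1 ++ List.replicate z.toNat 2,
        (x - 1) :: y :: z :: r, ?_, ?_, ?_⟩
      · show List.replicate x.toNat 0 ++ _ ++ _ = _
        rw [show x.toNat = (x - 1).toNat + 1 by omega, List.replicate_succ]; rfl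
      · rw [pvAssignGo, if_pos ⟨rfl, by rwa [hgx]⟩]
        simp [List.modify, pvCost]; try ring
      · rfl
    · have hordx : List.replicate x.toNat (0:Int) = [] := by
        rw [show x.toNat = 0 by omega]; rfl
      by_cases hy : y > 0
      · right
        refine ⟨1, List.replicate (y - 1).toNat 1 ++ List.replicate z.toNat 2,
          x :: (y - 1) :: z :: r, ?_, ?_, ?_⟩
        · show List.replicate x.toNat 0 ++ List.replicate y.toNat 1 ++ _ = _
          rw [hordx, show y.toNat = (y - 1).toNat + 1 by omega, List.replicate_succ]; rfl
        · rw [pvAssignGo, if_neg (by rw [hgx]; simp; omega), if_neg (by simp), if_neg (by simp),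
              pvAssignGo, if_neg (by simp), if_pos ⟨rfl, by rwa [hgy]⟩]
          simp [List.modify, pvCost]; try ring
        · show List.replicate x.toNat 0 ++ List.replicate (y-1).toNat 1 ++ _ = _
          rw [hordx]; rfl
      · have hordy : List.replicate y.toNat (1:Int) = [] := by
          rw [show y.toNat = 0 by omega]; rfl
        by_cases hz : z > 0
        · right
          refine ⟨2, List.replicate (z - 1).toNat 2, x :: y :: (z - 1) :: r, ?_, ?_, ?_⟩
          · show List.replicate x.toNat 0 ++ List.replicate y.toNat 1 ++ List.replicate z.toNat 2 = _
            rw [hordx, hordy, show z.toNat = (z - 1).toNat + 1 by omega, List.replicate_succ]; rfl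
          · rw [pvAssignGo, if_neg (by rw [hgx]; simp; omega), if_neg (by simp), if_neg (by simp),
                pvAssignGo, if_neg (by simp), if_neg (by rw [hgy]; simp; omega), if_neg (by simp),
                pvAssignGo, if_neg (by simp), if_neg (by simp), if_pos ⟨rfl, by rwa [hgz]⟩]
            simp [List.modify, pvCost]; try ring
          · show List.replicate x.toNat 0 ++ List.replicate y.toNat 1 ++ List.replicate (z-1).toNat 2 = _
            rw [hordx, hordy]; rfl
        · left
          constructor
          · show List.replicate x.toNat 0 ++ List.replicate y.toNat 1 ++ List.replicate z.toNat 2 = []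
            rw [hordx, hordy, show z.toNat = 0 by omega]; rfl
          · rw [pvAssignGo, if_neg (by rw [hgx]; simp; omega), if_neg (by simp), if_neg (by simp),
                pvAssignGo, if_neg (by simp), if_neg (by rw [hgy]; simp; omega), if_neg (by simp),
                pvAssignGo, if_neg (by simp), if_neg (by simp), if_neg (by rw [hgz]; simp; omega)]
            exact assign_skip _ _ _ _ _ _ hskip

lemma greedy_eq_zipSum (L : List (Int × Int × Int)) (p : List Int) (a : Int) :
    (L.foldl (fun st idx => pvAssignGo idx.1 idx.2.1 idx.2.2 st.1 st.2
        (PySem.List.pyRange 0 (st.2.length : Int) 1)) (a, p)).1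
      = a + pvZipSum L (pvOrdF p) := by
  induction L generalizing p a with
  | nil => simp [pvZipSum]
  | cons g L ih =>
    rcases assign_char p a g.1 g.2.1 g.2.2 with ⟨hord, hstep⟩ | ⟨k, t, q, hord, hstep, hq⟩
    · rw [List.foldl_cons, hstep, ih, hord, pvZipSum_nil_right, pvZipSum_nil_right]
    · rw [List.foldl_cons, hstep, ih, hq, hord, pvZipSum_cons]
      have : (g.1, g.2.1, g.2.2) = g := rfl
      rw [this]; ring

-- ---- effective length ----

lemma trunc_len_le (picks : List Int) (minerals : List String)
    (hpre : Pre_solution picks minerals) :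
    (if 5 * picks.sum < (minerals.length : Int)
        then PySem.List.slice minerals none (some (5 * picks.sum)) else minerals).length ≤ 50 := by
  unfold Pre_solution pvEffLen at hpre
  simp only at hpre
  split_ifs with h
  · rw [if_pos h] at hpre
    by_cases hs : 0 ≤ 5 * picks.sum
    · rw [PySem.List.slice_to _ hs, List.length_take]
      rw [if_pos hs] at hpre
      omega
    · have hk : 0 < (-(5 * picks.sum)).toNat := by omega
      have : (5 * picks.sum) = -(((-(5 * picks.sum)).toNat : Int)) := by omega
      rw [this, PySem.List.slice_to_neg_natCast _ _ hk, List.length_take]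
      rw [if_neg (by omega)] at hpre
      omega
  · rw [if_neg h] at hpre
    omega

lemma sum_foldl_eq (picks : List Int) :
    picks.foldl (fun acc pick => acc + pick) 0 = picks.sum := by
  rw [List.sum_eq_foldl]

-- ---- B's streaming flush as chunk counting ----

def pvChunks (m : List String) : List (List String) :=
  (List.range (m.length / 5)).map (fun j => (m.drop (5 * j)).take 5)

def pvPartial (m : List String) : List String := m.drop (5 * (m.length / 5))

lemma length_pvPartial (m : List String) : (pvPartial m).length = m.length % 5 := by
  simp [pvPartial]; omega

lemma stream_eq (m : List String) :
    m.foldl pvFlushStep (PySem.Dict.empty, ((0:Int), (0:Int), (0:Int)))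
      = (((pvChunks m).map pvCnt3).foldl
          (fun f t => f.insert t (f.getD t 0 + 1))
          (PySem.Dict.empty : PySem.Dict (Int × Int × Int) Int),
         pvCnt3 (pvPartial m)) := by
  induction m using List.reverseRecOn with
  | nil => rfl
  | append_singleton m x ih =>
    rw [List.foldl_append, ih, List.foldl_cons, List.foldl_nil]
    set D := ((pvChunks m).map pvCnt3).foldl
        (fun f t => f.insert t (f.getD t 0 + 1))
        (PySem.Dict.empty : PySem.Dict (Int × Int × Int) Int) with hD
    have ht : pvFlushStep (D, pvCnt3 (pvPartial m)) x
        = (if ((pvPartial m ++ [x]).length : Int) = 5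
           then (D.insert (pvCnt3 (pvPartial m ++ [x]))
                  (D.getD (pvCnt3 (pvPartial m ++ [x])) 0 + 1), ((0:Int), (0:Int), (0:Int)))
           else (D, pvCnt3 (pvPartial m ++ [x]))) := by
      have h1 : (if x = "diamond"
            then ((pvCnt3 (pvPartial m)).1 + 1, (pvCnt3 (pvPartial m)).2.1, (pvCnt3 (pvPartial m)).2.2)
            else if x = "iron"
            then ((pvCnt3 (pvPartial m)).1, (pvCnt3 (pvPartial m)).2.1 + 1, (pvCnt3 (pvPartial m)).2.2)
            else ((pvCnt3 (pvPartial m)).1, (pvCnt3 (pvPartial m)).2.1, (pvCnt3 (pvPartial m)).2.2 + 1))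
          = pvCnt3 (pvPartial m ++ [x]) := by
        rw [pvCnt3_append]; split_ifs <;> rfl
      simp only [pvFlushStep, h1, pvCnt3_sum]
    rw [ht]
    have hrlt : m.length % 5 < 5 := Nat.mod_lt _ (by norm_num)
    by_cases hr : m.length % 5 = 4
    · have hlen5 : (pvPartial m ++ [x]).length = 5 := by
        rw [List.length_append, length_pvPartial, hr]; rfl
      rw [if_pos (by rw [hlen5]; norm_num)]
      have hq1 : (m ++ [x]).length / 5 = m.length / 5 + 1 := by simp; omega
      have hchunks : pvChunks (m ++ [x]) = pvChunks m ++ [pvPartial m ++ [x]] := by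
        unfold pvChunks
        rw [hq1, List.range_succ, List.map_append, List.map_singleton]
        congr 1
        · apply List.map_congr_left
          intro j hj
          rw [List.mem_range] at hj
          exact chunk_append_ne m x j (by omega)
        · rw [chunk_append_eq, List.take_of_length_le
              (show (m.drop (5 * (m.length / 5))).length ≤ 5 by rw [List.length_drop]; omega)]
          rfl
      have hpart : pvPartial (m ++ [x]) = [] := by
        apply List.drop_eq_nil_of_le
        rw [hq1, List.length_append]
        simp only [List.length_cons, List.length_nil]
        omega
      rw [hchunks, hpart, List.map_append, List.map_singleton, List.foldl_append,
          List.foldl_cons, List.foldl_nil, pvCnt3_nil, ← hD]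
    · have hlen5 : (pvPartial m ++ [x]).length = m.length % 5 + 1 := by
        rw [List.length_append, length_pvPartial]; rfl
      rw [if_neg (by rw [hlen5]; exact_mod_cast (by omega : ¬(m.length % 5 + 1 = 5)))]
      have hq1 : (m ++ [x]).length / 5 = m.length / 5 := by simp; omega
      have hchunks : pvChunks (m ++ [x]) = pvChunks m := by
        unfold pvChunks
        rw [hq1]
        apply List.map_congr_left
        intro j hj
        rw [List.mem_range] at hj
        exact chunk_append_ne m x j (by omega)
      have hpart : pvPartial (m ++ [x]) = pvPartial m ++ [x] := by
        unfold pvPartial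
        rw [hq1, List.drop_append_of_le_length (by omega)]
      rw [hchunks, hpart, ← hD]

-- ---- B's weights as the mapped flat order ----

def pvWt (k : Int) : Int × Int × Int :=
  if k = 0 then (1, 1, 1) else if k = 1 then (5, 1, 1) else (25, 5, 1)

def pvZipSumW (L : List (Int × Int × Int)) (ws : List (Int × Int × Int)) : Int :=
  ((L.zip ws).map (fun p => p.2.1 * p.1.1 + p.2.2.1 * p.1.2.1 + p.2.2.2 * p.1.2.2)).sum

lemma pvZipSumW_nil (ws : List (Int × Int × Int)) : pvZipSumW [] ws = 0 := rfl

lemma pvZipSumW_nil_right (L : List (Int × Int × Int)) : pvZipSumW L [] = 0 := by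
  cases L <;> rfl

lemma pvZipSumW_cons (g w : Int × Int × Int) (L ws : List (Int × Int × Int)) :
    pvZipSumW (g :: L) (w :: ws)
      = (w.1 * g.1 + w.2.1 * g.2.1 + w.2.2 * g.2.2) + pvZipSumW L ws := by
  simp [pvZipSumW]


lemma pvZipSumW_take (L ws : List (Int × Int × Int)) :
    pvZipSumW L (ws.take L.length) = pvZipSumW L ws := by
  induction L generalizing ws with
  | nil => rfl
  | cons g L ih =>
    cases ws with
    | nil => rfl
    | cons w ws =>
      rw [List.length_cons, List.take_succ_cons, pvZipSumW_cons, pvZipSumW_cons, ih]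

lemma cap_fold (capN : Nat) (pairs : List ((Int × Int × Int) × Int))
    (acc : List (Int × Int × Int)) (hacc : acc.length ≤ capN) :
    pairs.foldl (fun acc wp =>
        acc ++ List.replicate (min wp.2 ((capN : Int) - (acc.length : Int))).toNat wp.1) acc
      = (acc ++ pairs.flatMap (fun wp => List.replicate wp.2.toNat wp.1)).take capN := by
  induction pairs generalizing acc with
  | nil => rw [List.foldl_nil, List.flatMap_nil, List.append_nil, List.take_of_length_le hacc]
  | cons wp pairs ih =>
    rw [List.foldl_cons, List.flatMap_cons]
    set v := wp.2 with hv
    have hmin : (min v ((capN : Int) - (acc.length : Int))).toNat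
        = min v.toNat (capN - acc.length) := by omega
    have hacc2 : (acc ++ List.replicate (min v ((capN : Int) - (acc.length : Int))).toNat wp.1).length
        ≤ capN := by
      rw [List.length_append, List.length_replicate, hmin]; omega
    rw [ih _ hacc2]
    rcases Nat.le_total v.toNat (capN - acc.length) with hle | hle
    · rw [hmin, Nat.min_eq_left hle, List.append_assoc]
    · rw [hmin, Nat.min_eq_right hle]
      have hx : ∀ w : Nat, capN - acc.length ≤ w →
          List.take capN (acc ++ (List.replicate w wp.1 ++ pairs.flatMap
              (fun wp => List.replicate wp.2.toNat wp.1)))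
            = acc ++ List.replicate (capN - acc.length) wp.1 := by
        intro w hw
        rw [List.take_append, List.take_of_length_le (by omega),
            List.take_append_of_le_length (by rw [List.length_replicate]; omega),
            List.take_replicate, Nat.min_eq_left (by omega)]
      rw [List.append_assoc, hx _ hle, hx _ (le_refl _)]

lemma flat_weights (picks : List Int) :
    (([((1:Int), (1:Int), (1:Int)), (5, 1, 1), (25, 5, 1)]).zip picks).flatMap
        (fun wp => List.replicate wp.2.toNat wp.1)
      = (pvOrdF picks).map pvWt := by
  match picks with
  | [] => rfl
  | [a] =>
    simp only [List.zip_cons_cons, List.zip_nil_right, List.flatMap_cons, List.flatMap_nil,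
      List.append_nil, pvOrdF, List.map_replicate]
    rfl
  | [a, b] =>
    simp only [List.zip_cons_cons, List.zip_nil_right, List.flatMap_cons, List.flatMap_nil,
      List.append_nil, pvOrdF, List.map_append, List.map_replicate]
    rfl
  | a :: b :: c :: r =>
    simp only [List.zip_cons_cons, List.zip_nil_left, List.flatMap_cons, List.flatMap_nil,
      List.append_nil, pvOrdF, List.map_append, List.map_replicate]
    rw [List.append_assoc]
    rfl

lemma ordF_mem (p : List Int) : ∀ k ∈ pvOrdF p, k = 0 ∨ k = 1 ∨ k = 2 := by
  intro k hk
  match p with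
  | [] => simp [pvOrdF] at hk
  | [a] =>
    simp only [pvOrdF, List.mem_replicate] at hk
    exact Or.inl hk.2
  | [a, b] =>
    simp only [pvOrdF, List.mem_append, List.mem_replicate] at hk
    rcases hk with h | h
    · exact Or.inl h.2
    · exact Or.inr (Or.inl h.2)
  | a :: b :: c :: r =>
    simp only [pvOrdF, List.mem_append, List.mem_replicate] at hk
    rcases hk with (h | h) | h
    · exact Or.inl h.2
    · exact Or.inr (Or.inl h.2)
    · exact Or.inr (Or.inr h.2)

lemma zipSum_eq_zipSumW (L : List (Int × Int × Int)) (o : List Int)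
    (ho : ∀ k ∈ o, k = 0 ∨ k = 1 ∨ k = 2) :
    pvZipSumW L (o.map pvWt) = pvZipSum L o := by
  induction L generalizing o with
  | nil => rw [pvZipSum]; rfl
  | cons g L ih =>
    cases o with
    | nil => rw [List.map_nil, pvZipSumW_nil_right, pvZipSum_nil_right]
    | cons k o =>
      rw [List.map_cons, pvZipSumW_cons, pvZipSum_cons,
          ih o (fun k' hk' => ho k' (List.mem_cons_of_mem _ hk'))]
      rcases ho k List.mem_cons_self with rfl | rfl | rfl <;>
        simp [pvWt, pvCost]

-- ---- the descending triple walk reproduces the sort ----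

def pvE (g : List (Int × Int × Int)) : List (Int × Int × Int) :=
  pvTriples.flatMap (fun t => List.replicate (g.count t) t)

lemma triples_pairwise : pvTriples.Pairwise (fun a b => pvKey a ≤ pvKey b) := by
  decide

lemma triples_nodup : pvTriples.Nodup := by
  decide

lemma mem_triples (d i s : Int) (hd : 0 ≤ d) (hi : 0 ≤ i) (hs : 0 ≤ s) (hsum : d + i + s ≤ 5) :
    (d, i, s) ∈ pvTriples := by
  have hd5 : d ≤ 5 := by omega
  have hi5 : i ≤ 5 := by omega
  have hs5 : s ≤ 5 := by omega
  interval_cases d <;> interval_cases i <;> interval_cases s <;> first | decide | (exfalso; omega)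

lemma count_flatMap_replicate {T : Type} [BEq T] [LawfulBEq T] (ts : List T) (hnd : ts.Nodup)
    (f : T → Nat) (a : T) :
    (ts.flatMap (fun t => List.replicate (f t) t)).count a = if a ∈ ts then f a else 0 := by
  induction ts with
  | nil => simp
  | cons t ts ih =>
    rw [List.flatMap_cons, List.count_append, ih hnd.of_cons, List.count_replicate]
    have hnt := (List.nodup_cons.1 hnd).1
    by_cases hat : t = a
    · subst hat
      simp [hnt]
    · have hta : a ≠ t := fun h => hat h.symm
      by_cases hm : a ∈ ts
      · simp [List.mem_cons, hat, hta, hm]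
      · simp [List.mem_cons, hat, hta, hm]

lemma perm_E (g : List (Int × Int × Int)) (hg : ∀ x ∈ g, x ∈ pvTriples) :
    (pvE g).Perm g := by
  rw [List.perm_iff_count]
  intro a
  unfold pvE
  rw [count_flatMap_replicate pvTriples triples_nodup (fun t => g.count t) a]
  by_cases ha : a ∈ pvTriples
  · rw [if_pos ha]
  · rw [if_neg ha, Eq.comm, List.count_eq_zero]
    exact fun hmem => ha (hg a hmem)

lemma pairwise_flatMap_replicate (ts : List (Int × Int × Int)) (f : (Int × Int × Int) → Nat)
    (h : ts.Pairwise (fun a b => pvKey a ≤ pvKey b)) :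
    (ts.flatMap (fun t => List.replicate (f t) t)).Pairwise (fun a b => pvKey a ≤ pvKey b) := by
  induction ts with
  | nil => simp
  | cons t ts ih =>
    rw [List.flatMap_cons, List.pairwise_append]
    refine ⟨?_, ih (List.pairwise_cons.1 h).2, ?_⟩
    · rw [List.pairwise_replicate]; right; exact le_refl _
    · intro a ha b hb
      rw [List.eq_of_mem_replicate ha]
      obtain ⟨u, hu, hbu⟩ := List.mem_flatMap.1 hb
      rw [List.eq_of_mem_replicate hbu]
      exact (List.pairwise_cons.1 h).1 u hu

lemma sorted_eq_E (g : List (Int × Int × Int)) (hg : ∀ x ∈ g, x ∈ pvTriples) :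
    PySem.List.sorted g pvKey = pvE g := by
  apply PySem.List.eq_of_perm_of_pairwise_le_of_injective pvKey pvKey_inj
  · exact (PySem.List.sorted_perm _ _ _).trans (perm_E g hg).symm
  · exact PySem.List.sorted_pairwise _ _
  · exact pairwise_flatMap_replicate _ _ triples_pairwise

-- ---- the pay fold ----

lemma zipSumW_replicate_append (t : Int × Int × Int) (c : Nat)
    (rest ws : List (Int × Int × Int)) :
    pvZipSumW (List.replicate c t ++ rest) ws
      = pvZipSumW (List.replicate c t) ws + pvZipSumW rest (ws.drop c) := by
  induction c generalizing ws with
  | zero => rw [List.replicate_zero, List.nil_append, List.drop_zero, pvZipSumW_nil]; ring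
  | succ c ih =>
    cases ws with
    | nil => rw [pvZipSumW_nil_right, pvZipSumW_nil_right, List.drop_nil, pvZipSumW_nil_right]; ring
    | cons w ws =>
      rw [List.replicate_succ, List.cons_append, pvZipSumW_cons, pvZipSumW_cons, ih,
          List.drop_succ_cons]
      ring

lemma take_pay (t : Int × Int × Int) (c : Nat) (ws : List (Int × Int × Int)) (ans : Int) :
    ((ws.take c).foldl (fun a w => a + w.1 * t.1 + w.2.1 * t.2.1 + w.2.2 * t.2.2) ans)
      = ans + pvZipSumW (List.replicate c t) ws := by
  induction c generalizing ws ans with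
  | zero => rw [List.take_zero, List.foldl_nil, List.replicate_zero, pvZipSumW_nil]; ring
  | succ c ih =>
    cases ws with
    | nil => rw [List.take_nil, pvZipSumW_nil_right]; simp
    | cons w ws =>
      rw [List.take_succ_cons, List.foldl_cons, ih, List.replicate_succ, pvZipSumW_cons]
      ring

lemma pay_fold (cnt : (Int × Int × Int) → Nat) (ts : List (Int × Int × Int))
    (ws : List (Int × Int × Int)) (ans : Int) :
    (ts.foldl (fun (st : Int × List (Int × Int × Int)) t =>
        ((st.2.take (cnt t)).foldl
            (fun a w => a + w.1 * t.1 + w.2.1 * t.2.1 + w.2.2 * t.2.2) st.1,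
         st.2.drop (cnt t))) (ans, ws)).1
      = ans + pvZipSumW (ts.flatMap (fun t => List.replicate (cnt t) t)) ws := by
  induction ts generalizing ws ans with
  | nil => rw [List.foldl_nil, List.flatMap_nil, pvZipSumW_nil]; ring
  | cons t ts ih =>
    rw [List.foldl_cons, List.flatMap_cons, zipSumW_replicate_append, ih, take_pay]
    ring

lemma groups_split (m : List String) :
    (List.range ((m.length + 4) / 5)).map (fun j => pvCnt3 ((m.drop (5 * j)).take 5))
      = (pvChunks m).map pvCnt3
        ++ (if pvPartial m = [] then [] else [pvCnt3 (pvPartial m)]) := by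
  by_cases hr : m.length % 5 = 0
  · have hp : pvPartial m = [] :=
      List.eq_nil_of_length_eq_zero (by rw [length_pvPartial, hr])
    rw [hp, if_pos rfl, List.append_nil]
    unfold pvChunks
    rw [List.map_map, show (m.length + 4) / 5 = m.length / 5 by omega]
    rfl
  · have hp : pvPartial m ≠ [] := by
      intro h
      have h2 := length_pvPartial m
      rw [h] at h2
      simp at h2
      omega
    rw [if_neg hp, show (m.length + 4) / 5 = m.length / 5 + 1 by omega,
        List.range_succ, List.map_append, List.map_singleton]
    unfold pvChunks
    rw [List.map_map]
    congr 1
    rw [List.take_of_length_le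
        (show (m.drop (5 * (m.length / 5))).length ≤ 5 by rw [List.length_drop]; omega)]
    rfl

-- ===== VERDICT =====

theorem solution_spec : Claim_equal_solution := by
  intro picks minerals _hdom hpre
  unfold Spec_solution solution solution_alt
  simp only [sum_foldl_eq]
  rw [show picks.sum * 5 = 5 * picks.sum by ring]
  have husable : (if 5 * picks.sum ≥ (minerals.length : Int) then minerals
      else PySem.List.slice minerals none (some (5 * picks.sum)))
      = (if 5 * picks.sum < (minerals.length : Int)
          then PySem.List.slice minerals none (some (5 * picks.sum)) else minerals) := by
    split_ifs with h1 h2 <;> first | rfl | omega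
  rw [husable]
  set m := (if 5 * picks.sum < (minerals.length : Int)
      then PySem.List.slice minerals none (some (5 * picks.sum)) else minerals) with hm
  have hlen : m.length ≤ 50 := trunc_len_le picks minerals hpre
  rw [cnt_fold_eq m hlen, stream_eq m]
  set G := (m.length + 4) / 5 with hG
  have hG10 : G ≤ 10 := by omega
  have hsplit : (List.range 10).map (fun j => pvCnt3 ((m.drop (5 * j)).take 5))
      = (List.range G).map (fun j => pvCnt3 ((m.drop (5 * j)).take 5))
        ++ List.replicate (10 - G) ((0:Int), (0:Int), (0:Int)) := by
    rw [show (10 : Nat) = G + (10 - G) by omega, List.range_add, List.map_append, List.map_map]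
    congr 1
    · rw [show G + (10 - G) - G = 10 - G by omega]
      refine List.eq_replicate_iff.mpr ⟨by simp, ?_⟩
      intro b hb
      rw [List.mem_map] at hb
      obtain ⟨y, hy, rfl⟩ := hb
      simp only [Function.comp_apply]
      rw [List.drop_eq_nil_of_le (by omega)]
      exact pvCnt3_nil
  rw [hsplit]
  set g := (List.range G).map (fun j => pvCnt3 ((m.drop (5 * j)).take 5)) with hg
  have hgmem : ∀ x ∈ g, x ∈ pvTriples := by
    intro x hx
    rw [hg, List.mem_map] at hx
    obtain ⟨j, _, rfl⟩ := hx
    obtain ⟨h1, h2, h3⟩ := pvCnt3_nonneg ((m.drop (5 * j)).take 5)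
    have h5 : ((m.drop (5 * j)).take 5).length ≤ 5 := by
      rw [List.length_take]; omega
    refine mem_triples _ _ _ h1 h2 h3 ?_

    omega
  have hgz : ∀ t ∈ g, pvKey t ≤ pvKey (0, 0, 0) := by
    intro t ht
    rw [hg, List.mem_map] at ht
    obtain ⟨j, _, rfl⟩ := ht
    obtain ⟨h1, h2, h3⟩ := pvCnt3_nonneg ((m.drop (5 * j)).take 5)
    exact pvKey_le_zero _ h1 h2 h3
  rw [sorted_append_zeros g (10 - G) hgz, greedy_eq_zipSum, pvZipSum_append_zeros]
  -- B's side
  set D := ((pvChunks m).map pvCnt3).foldl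
      (fun f t => f.insert t (f.getD t 0 + 1))
      (PySem.Dict.empty : PySem.Dict (Int × Int × Int) Int) with hD
  set p := pvCnt3 (pvPartial m) with hp
  have hgsplit : g = (pvChunks m).map pvCnt3
      ++ (if pvPartial m = [] then [] else [pvCnt3 (pvPartial m)]) := by
    rw [hg, hG]; exact groups_split m
  have hfreq : ∀ t : Int × Int × Int,
      (if p.1 + p.2.1 + p.2.2 > 0 then D.insert p (D.getD p 0 + 1) else D).getD t 0
        = (g.count t : Int) := by
    intro t
    have hDg : D.getD t 0 = (((pvChunks m).map pvCnt3).count t : Int) := by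
      rw [hD, PySem.Dict.getD_foldl_insert_add_one]
      simp
    have hsum : p.1 + p.2.1 + p.2.2 = ((pvPartial m).length : Int) := by
      rw [hp]; exact pvCnt3_sum _
    by_cases hpe : pvPartial m = []
    · rw [if_neg (by rw [hsum, hpe]; simp), hDg, hgsplit, if_pos hpe, List.append_nil]
    · have hpos : p.1 + p.2.1 + p.2.2 > 0 := by
        rw [hsum]
        have : (pvPartial m).length ≠ 0 := fun h => hpe (List.eq_nil_of_length_eq_zero h)
        omega
      rw [if_pos hpos, hgsplit, if_neg hpe]
      have : (D.insert p (D.getD p 0 + 1)).getD t 0 = D.getD t 0 + ([p].count t : Int) := by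
        have h := PySem.Dict.getD_foldl_insert_add_one [p] D t
        simpa using h
      rw [this, hDg, hp, List.count_append]
      push_cast
      ring
  have hgroups : PySem.Int.floordiv ((m.length : Int) + 4) 5 = (G : Int) := by
    have hc : ((m.length : Int) + 4) = ((m.length + 4 : Nat) : Int) := by push_cast; ring
    rw [hc, hG]
    exact_mod_cast PySem.Int.floordiv_natCast (m.length + 4) 5
  rw [hgroups, cap_fold G _ [] (by simp), List.nil_append, flat_weights]
  rw [pay_fold (fun t => ((if p.1 + p.2.1 + p.2.2 > 0
      then D.insert p (D.getD p 0 + 1) else D).getD t 0).toNat) pvTriples]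
  simp only [hfreq, Int.toNat_natCast]
  rw [show pvTriples.flatMap (fun t => List.replicate (g.count t) t) = pvE g from rfl]
  have hElen : (pvE g).length = G := by
    rw [(perm_E g hgmem).length_eq, hg, List.length_map, List.length_range]
  rw [← hElen, pvZipSumW_take, zipSum_eq_zipSumW _ _ (ordF_mem picks),
      ← sorted_eq_E g hgmem]
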